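-- pv_equiv track=rewrite | github.com/wellqin/USTC | leetcode/editor/cn/[491]递增子序列.py | findSubsequences_hs
-- ===== SOURCE A (Python) =====
-- def findSubsequences_hs(nums):
--     """
--     :type nums: List[int]
--     :rtype: List[List[int]]
--     """
--     n = len(nums)
--     res = []  # 一组解
--     incsq = [0]  # 一个解（n元0-1数组）
--
--     def backtrack(t):
--         if t == n:
--             return
--         incsq.append(0)
--         s = {}
--         for i in range(t + 1, n):  # 遍历第 t + 1~n-1 列（即n个状态)
--             if nums[i] >= nums[t] and nums[i] not in s:  # 同一层循环不能有重复数
--                 s[nums[i]] = 1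
--                 incsq[-1] = nums[i]
--                 res.append(incsq[:])  # 保存（一个解），注意incsq[:]
--                 backtrack(i)
--         incsq.pop()  # 回溯，出栈
--
--     # 第一个数单独遍历，避免加入单个数
--     s = {}
--     for i in range(n):
--         if nums[i] not in s:
--             s[nums[i]] = 1
--             incsq[0] = nums[i]
--             backtrack(i)
--     return res
-- ===== SOURCE B (Python) =====
-- def findSubsequences_hs(nums):
--     """
--     :type nums: List[int]
--     :rtype: List[List[int]]
--     """
--     n = len(nums)
--     raw = []   # every increasing subsequence (len >= 2) from a full, unpruned DFS, in pre-order
--     path = []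
--
--     def dfs(t):
--         for i in range(t + 1, n):
--             if nums[i] >= nums[t]:
--                 path.append(nums[i])
--                 raw.append(path[:])
--                 dfs(i)
--                 path.pop()
--
--     for i in range(n):
--         path.append(nums[i])
--         dfs(i)
--         path.pop()
--
--     # keep the first occurrence of each value-sequence, preserving encounter order
--     seen = set()
--     res = []
--     for seq in raw:
--         key = tuple(seq)
--         if key not in seen:
--             seen.add(key)
--             res.append(seq)
--     return res
-- ===== Notes on version B (the rewrite author's own statement) =====
-- stated objective: alternative
-- what changed: A prunes duplicate-value branches during the DFS with a per-level dict; B runs the full unpruned DFS over all index choices collecting every increasing subsequence in pre-order and then removes duplicates in one global pass keeping first occurrences, which yields the same list because each pruned subtree only re-produces earlier results.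
import Mathlib
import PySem

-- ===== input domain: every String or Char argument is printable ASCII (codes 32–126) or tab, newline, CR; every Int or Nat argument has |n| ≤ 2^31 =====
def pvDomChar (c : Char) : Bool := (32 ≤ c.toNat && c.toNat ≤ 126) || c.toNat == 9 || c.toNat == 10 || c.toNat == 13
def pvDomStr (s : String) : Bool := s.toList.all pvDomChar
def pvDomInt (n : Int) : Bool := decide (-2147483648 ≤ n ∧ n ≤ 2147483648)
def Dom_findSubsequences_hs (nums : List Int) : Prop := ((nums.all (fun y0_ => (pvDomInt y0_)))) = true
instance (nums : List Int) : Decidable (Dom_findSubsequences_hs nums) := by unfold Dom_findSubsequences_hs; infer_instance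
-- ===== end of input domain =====

-- B replaces A's in-search duplicate pruning (per-level dict) by a full unpruned DFS followed by one
-- global first-occurrence dedup pass; same return value, similar cost ("alternative").

-- ===== PORT A =====
-- A: recursive `backtrack(t)` mutating res/incsq, with a per-level dict `s` of values already used
-- at this level.  State (res, incsq) is threaded; `incsq[-1] = x` is `dropLast ++ [x]` (incsq is
-- never empty there), `incsq.pop()` is `dropLast`, `nums[i]` is `getD i 0` (in range by the loop
-- guard).  `if t == n: return` becomes the `t < nums.length` guard (t > n is unreachable).
mutual
def btALoop (nums : List Int) (t i : Nat) (s : PySem.Dict Int Int)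
    (res : List (List Int)) (incsq : List Int) : List (List Int) × List Int :=
  if h : i < nums.length then
    let x := nums.getD i 0
    if nums.getD t 0 ≤ x ∧ PySem.Dict.get? s x = none then  -- nums[i] >= nums[t] and nums[i] not in s
      let s' := PySem.Dict.insert s x 1                      -- s[nums[i]] = 1
      let incsq' := incsq.dropLast ++ [x]                    -- incsq[-1] = nums[i]
      let res' := res ++ [incsq']                            -- res.append(incsq[:])
      let st := btA nums i res' incsq'                       -- backtrack(i)
      btALoop nums t (i+1) s' st.1 st.2
    else
      btALoop nums t (i+1) s res incsq
  else (res, incsq)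
termination_by (nums.length - i) * 2 + 1
decreasing_by all_goals omega

def btA (nums : List Int) (t : Nat) (res : List (List Int)) (incsq : List Int) :
    List (List Int) × List Int :=
  if h : t < nums.length then
    let st := btALoop nums t (t+1) PySem.Dict.empty res (incsq ++ [0])  -- incsq.append(0)
    (st.1, st.2.dropLast)                                               -- incsq.pop()
  else (res, incsq)
termination_by (nums.length - t) * 2
decreasing_by omega
end

-- the final loop of A (`for i in range(n)`), with its own dict `s`; incsq stays a 1-element list
def topALoop (nums : List Int) (i : Nat) (s : PySem.Dict Int Int)
    (res : List (List Int)) (incsq : List Int) : List (List Int) × List Int :=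
  if h : i < nums.length then
    let x := nums.getD i 0
    if PySem.Dict.get? s x = none then       -- nums[i] not in s
      let s' := PySem.Dict.insert s x 1
      let incsq' := incsq.set 0 x            -- incsq[0] = nums[i]
      let st := btA nums i res incsq'
      topALoop nums (i+1) s' st.1 st.2
    else topALoop nums (i+1) s res incsq
  else (res, incsq)
termination_by nums.length - i

def findSubsequences_hs (nums : List Int) : List (List Int) :=
  (topALoop nums 0 PySem.Dict.empty [] [0]).1

-- ===== PORT B =====
-- B: full unpruned DFS recording every increasing subsequence (always length ≥ 2 inside dfs) in
-- pre-order into raw, then one pass keeping the first occurrence of each sequence.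
mutual
def dfsBLoop (nums : List Int) (t i : Nat)
    (raw : List (List Int)) (path : List Int) : List (List Int) × List Int :=
  if h : i < nums.length then
    if nums.getD t 0 ≤ nums.getD i 0 then    -- nums[i] >= nums[t]
      let path' := path ++ [nums.getD i 0]   -- path.append(nums[i])
      let raw' := raw ++ [path']             -- raw.append(path[:])
      let st := dfsB nums i raw' path'       -- dfs(i)
      dfsBLoop nums t (i+1) st.1 st.2.dropLast  -- path.pop()
    else dfsBLoop nums t (i+1) raw path
  else (raw, path)
termination_by (nums.length - i) * 2 + 1
decreasing_by all_goals omega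

def dfsB (nums : List Int) (t : Nat)
    (raw : List (List Int)) (path : List Int) : List (List Int) × List Int :=
  if _h : t < nums.length then dfsBLoop nums t (t+1) raw path else (raw, path)
termination_by (nums.length - t) * 2
decreasing_by omega
end

def topBLoop (nums : List Int) (i : Nat)
    (raw : List (List Int)) (path : List Int) : List (List Int) × List Int :=
  if h : i < nums.length then
    let path' := path ++ [nums.getD i 0]
    let st := dfsB nums i raw path'
    topBLoop nums (i+1) st.1 st.2.dropLast
  else (raw, path)
termination_by nums.length - i

-- `seen = set(); for seq in raw: if tuple(seq) not in seen: seen.add(...); res.append(seq)`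
def dedupBLoop (seen : PySem.Set (List Int)) (res : List (List Int)) :
    List (List Int) → List (List Int)
  | [] => res
  | seq :: rest =>
    if PySem.Set.contains seen seq then dedupBLoop seen res rest
    else dedupBLoop (PySem.Set.add seen seq) (res ++ [seq]) rest

def findSubsequences_hs_alt (nums : List Int) : List (List Int) :=
  dedupBLoop PySem.Set.empty [] (topBLoop nums 0 [] []).1

-- ===== PRECONDITION & SPEC =====
def Spec_findSubsequences_hs (nums : List Int) (out : List (List Int)) : Prop := out = findSubsequences_hs_alt nums
instance (nums : List Int) (out : List (List Int)) : Decidable (Spec_findSubsequences_hs nums out) := by unfold Spec_findSubsequences_hs; infer_instance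

-- ===== CLAIM (what is proved, stated in full; the proofs are below) =====
def Claim_equal_findSubsequences_hs : Prop := ∀ (nums : List Int), Dom_findSubsequences_hs nums → Spec_findSubsequences_hs nums (findSubsequences_hs nums)

-- ===== LEMMAS AND PROOFS =====

-- Clean (state-free) descriptions of the two searches.
-- `Tf nums t` : the tails A's backtrack(t) emits (pruned search); `TfL` its level loop, `seen` the
-- values already handled at this level.  `Ff nums t` : the tails B's dfs(t) emits (full search).
mutual
def TfL (nums : List Int) (t i : Nat) (seen : List Int) : List (List Int) :=
  if h : i < nums.length then
    if nums.getD t 0 ≤ nums.getD i 0 ∧ nums.getD i 0 ∉ seen then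
      ([nums.getD i 0] :: (Tf nums i).map (nums.getD i 0 :: ·)) ++
        TfL nums t (i+1) (nums.getD i 0 :: seen)
    else TfL nums t (i+1) seen
  else []
termination_by (nums.length - i) * 2 + 1
decreasing_by all_goals omega

def Tf (nums : List Int) (t : Nat) : List (List Int) :=
  if h : t < nums.length then TfL nums t (t+1) [] else []
termination_by (nums.length - t) * 2
decreasing_by omega
end

mutual
def FfL (nums : List Int) (t i : Nat) : List (List Int) :=
  if h : i < nums.length then
    if nums.getD t 0 ≤ nums.getD i 0 then
      ([nums.getD i 0] :: (Ff nums i).map (nums.getD i 0 :: ·)) ++ FfL nums t (i+1)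
    else FfL nums t (i+1)
  else []
termination_by (nums.length - i) * 2 + 1
decreasing_by all_goals omega

def Ff (nums : List Int) (t : Nat) : List (List Int) :=
  if h : t < nums.length then FfL nums t (t+1) else []
termination_by (nums.length - t) * 2
decreasing_by omega
end

def topT (nums : List Int) (i : Nat) (seen : List Int) : List (List Int) :=
  if h : i < nums.length then
    if nums.getD i 0 ∉ seen then
      (Tf nums i).map (nums.getD i 0 :: ·) ++ topT nums (i+1) (nums.getD i 0 :: seen)
    else topT nums (i+1) seen
  else []
termination_by nums.length - i

def topF (nums : List Int) (i : Nat) : List (List Int) :=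
  if _h : i < nums.length then
    (Ff nums i).map (nums.getD i 0 :: ·) ++ topF nums (i+1)
  else []
termination_by nums.length - i

-- first-occurrence dedup with an explicit seen list
def dedupS (seen : List (List Int)) : List (List Int) → List (List Int)
  | [] => []
  | x :: xs => if x ∈ seen then dedupS seen xs else x :: dedupS (x :: seen) xs

theorem dedupS_congr (s1 s2 : List (List Int)) (L : List (List Int))
    (h : ∀ l, l ∈ s1 ↔ l ∈ s2) : dedupS s1 L = dedupS s2 L := by
  induction L generalizing s1 s2 with
  | nil => rfl
  | cons x xs ih =>
    simp only [dedupS]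
    by_cases hx : x ∈ s1
    · rw [if_pos hx, if_pos ((h x).1 hx)]; exact ih s1 s2 h
    · rw [if_neg hx, if_neg (fun hx2 => hx ((h x).2 hx2))]
      exact congrArg _ (ih _ _ (by intro l; simp [h l]))

theorem dedupS_append (s L1 L2 : List (List Int)) :
    dedupS s (L1 ++ L2) = dedupS s L1 ++ dedupS (L1 ++ s) L2 := by
  induction L1 generalizing s with
  | nil => simp [dedupS]
  | cons x xs ih =>
    simp only [List.cons_append, dedupS]
    by_cases hx : x ∈ s
    · rw [if_pos hx, if_pos hx, ih s]
      congr 1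
      apply dedupS_congr
      intro l
      simp only [List.mem_cons, List.mem_append]
      constructor
      · tauto
      · rintro (rfl | h | h)
        exacts [Or.inr hx, Or.inl h, Or.inr h]
    · rw [if_neg hx, if_neg hx, ih (x :: s), List.cons_append]
      congr 2
      apply dedupS_congr
      intro l
      simp only [List.mem_cons, List.mem_append]
      tauto

theorem dedupS_nil_of_subset (s L : List (List Int)) (h : ∀ l ∈ L, l ∈ s) :
    dedupS s L = [] := by
  induction L with
  | nil => rfl
  | cons x xs ih =>
    simp only [dedupS, if_pos (h x (by simp))]
    exact ih (fun l hl => h l (by simp [hl]))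

def tailIf (w : Int) : List Int → Option (List Int)
  | [] => none
  | x :: r => if x = w then some r else none

theorem mem_filterMap_tailIf (w : Int) (s : List (List Int)) (r : List Int) :
    r ∈ s.filterMap (tailIf w) ↔ w :: r ∈ s := by
  have key : ∀ a : List Int, tailIf w a = some r ↔ a = w :: r := by
    intro a
    cases a with
    | nil => simp [tailIf]
    | cons x t =>
      simp only [tailIf]
      by_cases hx : x = w
      · subst hx; simp
      · simp [hx]
  simp [List.mem_filterMap, key]

theorem dedupS_map_cons (w : Int) (s : List (List Int)) (L : List (List Int)) :
    dedupS s (L.map (w :: ·)) = (dedupS (s.filterMap (tailIf w)) L).map (w :: ·) := by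
  induction L generalizing s with
  | nil => rfl
  | cons x xs ih =>
    simp only [List.map_cons, dedupS]
    by_cases hx : w :: x ∈ s
    · rw [if_pos hx, if_pos ((mem_filterMap_tailIf w s x).2 hx), ih s]
    · rw [if_neg hx, if_neg (fun h2 => hx ((mem_filterMap_tailIf w s x).1 h2)),
        List.map_cons, ih ((w :: x) :: s)]
      simp [tailIf]

theorem mem_FfL_aux (nums : List Int) : ∀ (m : Nat), ∀ (i t : Nat) (l : List Int),
    nums.length - i ≤ m →
    (l ∈ FfL nums t i ↔ ∃ j, i ≤ j ∧ j < nums.length ∧ nums.getD t 0 ≤ nums.getD j 0 ∧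
      (l = [nums.getD j 0] ∨ ∃ r, r ∈ Ff nums j ∧ l = nums.getD j 0 :: r)) := by
  intro m
  induction m with
  | zero =>
    intro i t l hm
    rw [FfL, dif_neg (by omega)]
    simp only [List.not_mem_nil, false_iff]
    rintro ⟨j, h1, h2, -⟩; omega
  | succ m ih =>
    intro i t l hm
    rw [FfL]
    by_cases hin : i < nums.length
    · rw [dif_pos hin]
      by_cases hc : nums.getD t 0 ≤ nums.getD i 0
      · rw [if_pos hc]
        simp only [List.mem_append, List.mem_cons, List.mem_map]
        rw [ih (i+1) t l (by omega)]
        constructor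
        · rintro ((rfl | ⟨r, hr, rfl⟩) | ⟨j, hj1, hj2, hj3, hsh⟩)
          · exact ⟨i, le_refl _, hin, hc, Or.inl rfl⟩
          · exact ⟨i, le_refl _, hin, hc, Or.inr ⟨r, hr, rfl⟩⟩
          · exact ⟨j, by omega, hj2, hj3, hsh⟩
        · rintro ⟨j, hj1, hj2, hj3, hsh⟩
          by_cases hji : j = i
          · subst hji
            rcases hsh with rfl | ⟨r, hr, rfl⟩
            · exact Or.inl (Or.inl rfl)
            · exact Or.inl (Or.inr ⟨r, hr, rfl⟩)
          · exact Or.inr ⟨j, by omega, hj2, hj3, hsh⟩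
      · rw [if_neg hc, ih (i+1) t l (by omega)]
        constructor
        · rintro ⟨j, hj1, hj2, hj3, hsh⟩
          exact ⟨j, by omega, hj2, hj3, hsh⟩
        · rintro ⟨j, hj1, hj2, hj3, hsh⟩
          have hji : j ≠ i := by rintro rfl; exact hc hj3
          exact ⟨j, by omega, hj2, hj3, hsh⟩
    · rw [dif_neg hin]
      simp only [List.not_mem_nil, false_iff]
      rintro ⟨j, h1, h2, -⟩; omega

theorem mem_FfL (nums : List Int) : ∀ (i t : Nat) (l : List Int),
    l ∈ FfL nums t i ↔ ∃ j, i ≤ j ∧ j < nums.length ∧ nums.getD t 0 ≤ nums.getD j 0 ∧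
      (l = [nums.getD j 0] ∨ ∃ r, r ∈ Ff nums j ∧ l = nums.getD j 0 :: r) :=
  fun i t l => mem_FfL_aux nums nums.length i t l (by omega)

theorem mem_Ff (nums : List Int) (t : Nat) (l : List Int) :
    l ∈ Ff nums t ↔ ∃ j, t < j ∧ j < nums.length ∧ nums.getD t 0 ≤ nums.getD j 0 ∧
      (l = [nums.getD j 0] ∨ ∃ r, r ∈ Ff nums j ∧ l = nums.getD j 0 :: r) := by
  rw [Ff]
  by_cases ht : t < nums.length
  · rw [dif_pos ht, mem_FfL]
    constructor
    · rintro ⟨j, h1, h2, h3, h4⟩; exact ⟨j, by omega, h2, h3, h4⟩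
    · rintro ⟨j, h1, h2, h3, h4⟩; exact ⟨j, by omega, h2, h3, h4⟩
  · rw [dif_neg ht]
    simp only [List.not_mem_nil, false_iff]
    rintro ⟨j, h1, h2, -⟩; omega

theorem Ff_mono (nums : List Int) {j i : Nat} (hji : j < i)
    (hv : nums.getD j 0 ≤ nums.getD i 0) {l : List Int} (hl : l ∈ Ff nums i) :
    l ∈ Ff nums j := by
  rw [mem_Ff] at hl ⊢
  obtain ⟨k, h1, h2, h3, h4⟩ := hl
  exact ⟨k, by omega, h2, le_trans hv h3, h4⟩

theorem Ff_ne_nil (nums : List Int) (t : Nat) {l : List Int} (hl : l ∈ Ff nums t) : l ≠ [] := by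
  rw [mem_Ff] at hl
  obtain ⟨k, -, -, -, rfl | ⟨r, -, rfl⟩⟩ := hl <;> simp

-- the heart: global first-occurrence dedup of the full search equals the pruned search
theorem mainAux (nums : List Int) : ∀ m : Nat,
    (∀ u S, (nums.length - u) * 2 ≤ m → (∀ r ∈ Ff nums u, r ∉ S) →
      dedupS S (Ff nums u) = Tf nums u) ∧
    (∀ t i seen S, (nums.length - i) * 2 + 1 ≤ m → t < i →
      (∀ w, w ∈ seen ↔ ∃ j, t < j ∧ j < i ∧ nums.getD t 0 ≤ nums.getD j 0 ∧ nums.getD j 0 = w) →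
      (∀ j, t < j → j < i → nums.getD t 0 ≤ nums.getD j 0 →
        ([nums.getD j 0] ∈ S ∧ ∀ r ∈ Ff nums j, nums.getD j 0 :: r ∈ S)) →
      (∀ l ∈ FfL nums t i, ∀ w, l.head? = some w → w ∉ seen → l ∉ S) →
      dedupS S (FfL nums t i) = TfL nums t i seen) := by
  intro m
  induction m with
  | zero =>
    refine ⟨?_, by omega⟩
    intro u S hm hdisj
    have hu : nums.length ≤ u := by omega
    rw [Ff, dif_neg (by omega), Tf, dif_neg (by omega)]
    rfl
  | succ m ih =>
    constructor
    · -- F-part: dedup of the whole subtree at u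
      intro u S hm hdisj
      by_cases hu : u < nums.length
      · rw [Ff, dif_pos hu, Tf, dif_pos hu]
        refine ih.2 u (u+1) [] S (by omega) (by omega) ?_ (by omega) ?_
        · intro w
          simp only [List.not_mem_nil, false_iff]
          rintro ⟨j, h1, h2, -⟩; omega
        · intro l hl w _ _
          refine hdisj l ?_
          rw [Ff, dif_pos hu]
          exact hl
      · rw [Ff, dif_neg hu, Tf, dif_neg hu]; rfl
    · -- L-part: the level loop at (t, i)
      intro t i seen S hm hti hseen hHA hHB
      by_cases hin : i < nums.length
      · have hx : nums.getD i 0 = nums.getD i 0 := rfl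
        by_cases hv : nums.getD t 0 ≤ nums.getD i 0
        · -- full search takes candidate i
          have hchunk : FfL nums t i =
              ([nums.getD i 0] :: (Ff nums i).map (nums.getD i 0 :: ·)) ++ FfL nums t (i+1) := by
            rw [FfL, dif_pos hin, if_pos hv]
          have hmemxi : [nums.getD i 0] ∈ FfL nums t i :=
            (mem_FfL nums i t _).mpr ⟨i, le_refl _, hin, hv, Or.inl rfl⟩
          have hmemcons : ∀ r ∈ Ff nums i, nums.getD i 0 :: r ∈ FfL nums t i := by
            intro r hr
            exact (mem_FfL nums i t _).mpr ⟨i, le_refl _, hin, hv, Or.inr ⟨r, hr, rfl⟩⟩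
          have hheads : ∀ l ∈ ([nums.getD i 0] :: (Ff nums i).map (nums.getD i 0 :: ·)),
              l.head? = some (nums.getD i 0) := by
            intro l hl
            rcases List.mem_cons.mp hl with rfl | hl'
            · rfl
            · obtain ⟨r, -, rfl⟩ := List.mem_map.mp hl'
              rfl
          rw [hchunk, dedupS_append]
          by_cases hs : nums.getD i 0 ∈ seen
          · -- pruned search skips: the whole chunk was already emitted
            obtain ⟨j, hj1, hj2, hj3, hj4⟩ := (hseen _).mp hs
            have hzero : dedupS S ([nums.getD i 0] :: (Ff nums i).map (nums.getD i 0 :: ·)) = [] := by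
              refine dedupS_nil_of_subset S _ ?_
              intro l hl
              rcases List.mem_cons.mp hl with rfl | hl'
              · have := (hHA j hj1 hj2 hj3).1
                rwa [hj4] at this
              · obtain ⟨r, hr, rfl⟩ := List.mem_map.mp hl'
                have hrj : r ∈ Ff nums j := Ff_mono nums hj2 (le_of_eq hj4) hr
                have := (hHA j hj1 hj2 hj3).2 r hrj
                rwa [hj4] at this
            rw [hzero, TfL, dif_pos hin, if_neg (by tauto), List.nil_append]
            refine ih.2 t (i+1) seen _ (by omega) (by omega) ?_ ?_ ?_
            · intro w
              rw [hseen w]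
              constructor
              · rintro ⟨k, h1, h2, h3, h4⟩; exact ⟨k, h1, by omega, h3, h4⟩
              · rintro ⟨k, h1, h2, h3, h4⟩
                by_cases hk : k = i
                · subst hk; subst h4; exact ((hseen _).mp hs).imp (fun j h => by tauto)
                · exact ⟨k, h1, by omega, h3, h4⟩
            · intro k hk1 hk2 hk3
              by_cases hk : k = i
              · subst hk
                constructor
                · exact List.mem_append_left _ (by simp)
                · intro r hr
                  exact List.mem_append_left _ (by
                    simp only [List.mem_cons, List.mem_map]
                    exact Or.inr ⟨r, hr, rfl⟩)
              · obtain ⟨h5, h6⟩ := hHA k hk1 (by omega) hk3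
                exact ⟨List.mem_append_right _ h5, fun r hr => List.mem_append_right _ (h6 r hr)⟩
            · intro l hl w hw hwseen hmem
              rcases List.mem_append.mp hmem with hl2 | hl2
              · have := hheads l hl2
                rw [hw] at this
                exact hwseen (by cases this; exact hs)
              · exact hHB l (hchunk ▸ List.mem_append_right _ hl) w hw hwseen hl2
          · -- both take candidate i
            have h1 : [nums.getD i 0] ∉ S := hHB _ hmemxi _ rfl hs
            have hded : dedupS S ([nums.getD i 0] :: (Ff nums i).map (nums.getD i 0 :: ·)) =
                [nums.getD i 0] :: (Tf nums i).map (nums.getD i 0 :: ·) := by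
              simp only [dedupS, if_neg h1]
              rw [dedupS_map_cons]
              congr 2
              refine ih.1 i _ (by omega) ?_
              intro r hr hrS
              simp only [List.filterMap_cons, tailIf] at hrS
              rcases List.mem_cons.mp hrS with rfl | hrS'
              · exact Ff_ne_nil nums i hr rfl
              · exact hHB _ (hmemcons r hr) _ rfl hs ((mem_filterMap_tailIf _ _ _).mp hrS')
            rw [hded, TfL, dif_pos hin, if_pos ⟨hv, hs⟩]
            congr 1
            refine ih.2 t (i+1) (nums.getD i 0 :: seen) _ (by omega) (by omega) ?_ ?_ ?_
            · intro w
              simp only [List.mem_cons]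
              constructor
              · rintro (rfl | hw)
                · exact ⟨i, hti, by omega, hv, rfl⟩
                · obtain ⟨k, h1', h2', h3', h4'⟩ := (hseen w).mp hw
                  exact ⟨k, h1', by omega, h3', h4'⟩
              · rintro ⟨k, h1', h2', h3', h4'⟩
                by_cases hk : k = i
                · subst hk; exact Or.inl h4'.symm
                · exact Or.inr ((hseen w).mpr ⟨k, h1', by omega, h3', h4'⟩)
            · intro k hk1 hk2 hk3
              by_cases hk : k = i
              · subst hk
                refine ⟨List.mem_append_left _ (by simp), ?_⟩
                intro r hr
                exact List.mem_append_left _ (by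
                  simp only [List.mem_cons, List.mem_map]
                  exact Or.inr ⟨r, hr, rfl⟩)
              · obtain ⟨h5, h6⟩ := hHA k hk1 (by omega) hk3
                exact ⟨List.mem_append_right _ h5, fun r hr => List.mem_append_right _ (h6 r hr)⟩
            · intro l hl w hw hwseen
              have hwx : w ≠ nums.getD i 0 := fun h => hwseen (h ▸ List.mem_cons_self)
              have hwseen' : w ∉ seen := fun h => hwseen (List.mem_cons_of_mem _ h)
              intro hmem
              rcases List.mem_append.mp hmem with hl2 | hl2
              · have := hheads l hl2
                rw [hw] at this
                exact hwx (by cases this; rfl)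
              · exact hHB l (hchunk ▸ List.mem_append_right _ hl) w hw hwseen' hl2
        · -- value too small: both skip
          have hchunk : FfL nums t i = FfL nums t (i+1) := by
            rw [FfL, dif_pos hin, if_neg hv]
          rw [hchunk, TfL, dif_pos hin, if_neg (by tauto)]
          refine ih.2 t (i+1) seen S (by omega) (by omega) ?_ ?_ ?_
          · intro w
            rw [hseen w]
            constructor
            · rintro ⟨k, h1, h2, h3, h4⟩; exact ⟨k, h1, by omega, h3, h4⟩
            · rintro ⟨k, h1, h2, h3, h4⟩
              have hk : k ≠ i := fun h => hv (h ▸ h3)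
              exact ⟨k, h1, by omega, h3, h4⟩
          · intro k hk1 hk2 hk3
            have hk : k ≠ i := fun h => hv (h ▸ hk3)
            exact hHA k hk1 (by omega) hk3
          · intro l hl
            exact hHB l (hchunk ▸ hl)
      · rw [FfL, dif_neg hin, TfL, dif_neg hin]; rfl

theorem mainTop (nums : List Int) : ∀ (m i : Nat) (seen : List Int) (S : List (List Int)),
    nums.length - i ≤ m →
    (∀ w, w ∈ seen ↔ ∃ j, j < i ∧ nums.getD j 0 = w) →
    (∀ j, j < i → ∀ r ∈ Ff nums j, nums.getD j 0 :: r ∈ S) →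
    (∀ l ∈ topF nums i, ∀ w, l.head? = some w → w ∉ seen → l ∉ S) →
    dedupS S (topF nums i) = topT nums i seen := by
  intro m
  induction m with
  | zero =>
    intro i seen S hm hseen hHA hHB
    rw [topF, dif_neg (by omega), topT, dif_neg (by omega)]
    rfl
  | succ m ih =>
    intro i seen S hm hseen hHA hHB
    by_cases hin : i < nums.length
    · have hchunk : topF nums i = (Ff nums i).map (nums.getD i 0 :: ·) ++ topF nums (i+1) := by
        rw [topF, dif_pos hin]
      have hheads : ∀ l ∈ (Ff nums i).map (nums.getD i 0 :: ·),
          l.head? = some (nums.getD i 0) := by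
        intro l hl
        obtain ⟨r, -, rfl⟩ := List.mem_map.mp hl
        rfl
      have hmemcons : ∀ r ∈ Ff nums i, nums.getD i 0 :: r ∈ topF nums i := by
        intro r hr
        rw [hchunk]
        exact List.mem_append_left _ (List.mem_map.mpr ⟨r, hr, rfl⟩)
      rw [hchunk, dedupS_append]
      by_cases hs : nums.getD i 0 ∈ seen
      · -- value already started earlier: chunk is all duplicates
        obtain ⟨j, hj1, hj2⟩ := (hseen _).mp hs
        have hzero : dedupS S ((Ff nums i).map (nums.getD i 0 :: ·)) = [] := by
          refine dedupS_nil_of_subset S _ ?_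
          intro l hl
          obtain ⟨r, hr, rfl⟩ := List.mem_map.mp hl
          have hrj : r ∈ Ff nums j := Ff_mono nums hj1 (le_of_eq hj2) hr
          have := hHA j hj1 r hrj
          rwa [hj2] at this
        rw [hzero, topT, dif_pos hin, if_neg (by simpa using hs), List.nil_append]
        refine ih (i+1) seen _ (by omega) ?_ ?_ ?_
        · intro w
          rw [hseen w]
          constructor
          · rintro ⟨k, h1, h2⟩; exact ⟨k, by omega, h2⟩
          · rintro ⟨k, h1, h2⟩
            by_cases hk : k = i
            · subst hk; subst h2; exact ⟨j, hj1, hj2⟩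
            · exact ⟨k, by omega, h2⟩
        · intro k hk1 r hr
          by_cases hk : k = i
          · subst hk
            exact List.mem_append_left _ (List.mem_map.mpr ⟨r, hr, rfl⟩)
          · exact List.mem_append_right _ (hHA k (by omega) r hr)
        · intro l hl w hw hwseen hmem
          rcases List.mem_append.mp hmem with hl2 | hl2
          · have := hheads l hl2
            rw [hw] at this
            exact hwseen (by cases this; exact hs)
          · exact hHB l (hchunk ▸ List.mem_append_right _ hl) w hw hwseen hl2
      · -- first start of this value
        have hded : dedupS S ((Ff nums i).map (nums.getD i 0 :: ·)) =
            (Tf nums i).map (nums.getD i 0 :: ·) := by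
          rw [dedupS_map_cons]
          congr 1
          refine (mainAux nums (2 * nums.length)).1 i _ (by omega) ?_
          intro r hr hrS
          exact hHB _ (hmemcons r hr) _ rfl hs ((mem_filterMap_tailIf _ _ _).mp hrS)
        rw [hded, topT, dif_pos hin, if_pos (by simpa using hs)]
        congr 1
        refine ih (i+1) (nums.getD i 0 :: seen) _ (by omega) ?_ ?_ ?_
        · intro w
          simp only [List.mem_cons]
          constructor
          · rintro (rfl | hw)
            · exact ⟨i, by omega, rfl⟩
            · obtain ⟨k, h1, h2⟩ := (hseen w).mp hw
              exact ⟨k, by omega, h2⟩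
          · rintro ⟨k, h1, h2⟩
            by_cases hk : k = i
            · subst hk; exact Or.inl h2.symm
            · exact Or.inr ((hseen w).mpr ⟨k, by omega, h2⟩)
        · intro k hk1 r hr
          by_cases hk : k = i
          · subst hk
            exact List.mem_append_left _ (List.mem_map.mpr ⟨r, hr, rfl⟩)
          · exact List.mem_append_right _ (hHA k (by omega) r hr)
        · intro l hl w hw hwseen hmem
          have hwx : w ≠ nums.getD i 0 := fun h => hwseen (h ▸ List.mem_cons_self)
          have hwseen' : w ∉ seen := fun h => hwseen (List.mem_cons_of_mem _ h)
          rcases List.mem_append.mp hmem with hl2 | hl2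
          · have := hheads l hl2
            rw [hw] at this
            exact hwx (by cases this; rfl)
          · exact hHB l (hchunk ▸ List.mem_append_right _ hl) w hw hwseen' hl2
    · rw [topF, dif_neg hin, topT, dif_neg hin]
      rfl

-- ports agree with the clean descriptions
theorem portAAux (nums : List Int) : ∀ m : Nat,
    (∀ t res incsq, (nums.length - t) * 2 ≤ m →
      btA nums t res incsq = (res ++ (Tf nums t).map (incsq ++ ·), incsq)) ∧
    (∀ t i s seen res (q : List Int) (z : Int), (nums.length - i) * 2 + 1 ≤ m →
      (∀ x : Int, PySem.Dict.get? s x = none ↔ x ∉ seen) →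
      ∃ z', btALoop nums t i s res (q ++ [z]) =
        (res ++ (TfL nums t i seen).map (q ++ ·), q ++ [z'])) := by
  intro m
  induction m with
  | zero =>
    constructor
    · intro t res incsq hm
      rw [btA, dif_neg (by omega), Tf, dif_neg (by omega)]
      simp
    · omega
  | succ m ih =>
    constructor
    · -- btA
      intro t res incsq hm
      by_cases ht : t < nums.length
      · obtain ⟨z', hz⟩ := ih.2 t (t+1) PySem.Dict.empty [] res incsq 0 (by omega)
          (by intro x; simp [PySem.Dict.empty, PySem.Dict.get?])
        rw [btA, dif_pos ht, Tf, dif_pos ht]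
        simp only [hz]
        simp
      · rw [btA, dif_neg ht, Tf, dif_neg ht]
        simp
    · -- btALoop
      intro t i s seen res q z hm hdict
      by_cases hin : i < nums.length
      · by_cases hc : nums.getD t 0 ≤ nums.getD i 0 ∧ nums.getD i 0 ∉ seen
        · -- take
          have hcond : nums.getD t 0 ≤ nums.getD i 0 ∧ PySem.Dict.get? s (nums.getD i 0) = none :=
            ⟨hc.1, (hdict _).mpr hc.2⟩
          have hinc : (q ++ [z]).dropLast ++ [nums.getD i 0] = q ++ [nums.getD i 0] := by
            simp
          have hbt := (ih.1 i (res ++ [q ++ [nums.getD i 0]]) (q ++ [nums.getD i 0]) (by omega))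
          have hdict' : ∀ x : Int,
              PySem.Dict.get? (PySem.Dict.insert s (nums.getD i 0) 1) x = none ↔
              x ∉ nums.getD i 0 :: seen := by
            intro x
            by_cases hx : x = nums.getD i 0
            · subst hx
              rw [PySem.Dict.get?_insert_self]
              simp
            · rw [PySem.Dict.get?_insert_of_ne s 1 hx, hdict]
              simp only [List.mem_cons, not_or]
              exact ⟨fun h => ⟨hx, h⟩, And.right⟩
          obtain ⟨z', hz⟩ := ih.2 t (i+1) (PySem.Dict.insert s (nums.getD i 0) 1)
            (nums.getD i 0 :: seen) (res ++ [q ++ [nums.getD i 0]] ++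
              (Tf nums i).map ((q ++ [nums.getD i 0]) ++ ·)) q (nums.getD i 0) (by omega) hdict'
          have hTfL : TfL nums t i seen =
              ([nums.getD i 0] :: (Tf nums i).map (nums.getD i 0 :: ·)) ++
                TfL nums t (i+1) (nums.getD i 0 :: seen) := by
            rw [TfL, dif_pos hin, if_pos hc]
          refine ⟨z', ?_⟩
          rw [btALoop, dif_pos hin, if_pos hcond]
          simp only [hinc, hbt, hz, hTfL]
          simp [List.map_map, Function.comp_def, List.append_assoc]
        · -- skip
          have hcond : ¬(nums.getD t 0 ≤ nums.getD i 0 ∧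
              PySem.Dict.get? s (nums.getD i 0) = none) := by
            rw [hdict]; exact hc
          obtain ⟨z', hz⟩ := ih.2 t (i+1) s seen res q z (by omega) hdict
          have hTfL : TfL nums t i seen = TfL nums t (i+1) seen := by
            rw [TfL, dif_pos hin, if_neg hc]
          refine ⟨z', ?_⟩
          rw [btALoop, dif_pos hin, if_neg hcond, hz, hTfL]
      · refine ⟨z, ?_⟩
        rw [btALoop, dif_neg hin, TfL, dif_neg hin]
        simp

theorem topA_spec (nums : List Int) : ∀ (m i : Nat) s (seen : List Int) res (z : Int),
    nums.length - i ≤ m → (∀ x : Int, PySem.Dict.get? s x = none ↔ x ∉ seen) →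
    ∃ z', topALoop nums i s res [z] = (res ++ topT nums i seen, [z']) := by
  intro m
  induction m with
  | zero =>
    intro i s seen res z hm hdict
    rw [topALoop, dif_neg (by omega), topT, dif_neg (by omega)]
    exact ⟨z, by simp⟩
  | succ m ih =>
    intro i s seen res z hm hdict
    by_cases hin : i < nums.length
    · by_cases hs : nums.getD i 0 ∈ seen
      · obtain ⟨z', hz⟩ := ih (i+1) s seen res z (by omega) hdict
        have hTop : topT nums i seen = topT nums (i+1) seen := by
          rw [topT, dif_pos hin, if_neg (by simpa using hs)]
        refine ⟨z', ?_⟩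
        rw [topALoop, dif_pos hin, if_neg (by rw [hdict]; simpa using hs), hz, hTop]
      · have hset : ([z] : List Int).set 0 (nums.getD i 0) = [nums.getD i 0] := rfl
        have hbt := (portAAux nums (2 * nums.length)).1 i res [nums.getD i 0] (by omega)
        have hdict' : ∀ x : Int,
            PySem.Dict.get? (PySem.Dict.insert s (nums.getD i 0) 1) x = none ↔
            x ∉ nums.getD i 0 :: seen := by
          intro x
          by_cases hx : x = nums.getD i 0
          · subst hx
            rw [PySem.Dict.get?_insert_self]
            simp
          · rw [PySem.Dict.get?_insert_of_ne s 1 hx, hdict]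
            simp only [List.mem_cons, not_or]
            exact ⟨fun h => ⟨hx, h⟩, And.right⟩
        obtain ⟨z', hz⟩ := ih (i+1) (PySem.Dict.insert s (nums.getD i 0) 1)
          (nums.getD i 0 :: seen)
          (res ++ (Tf nums i).map ([nums.getD i 0] ++ ·)) (nums.getD i 0) (by omega) hdict'
        refine ⟨z', ?_⟩
        have hTop : topT nums i seen =
            (Tf nums i).map (nums.getD i 0 :: ·) ++ topT nums (i+1) (nums.getD i 0 :: seen) := by
          rw [topT, dif_pos hin, if_pos (by simpa using hs)]
        rw [topALoop, dif_pos hin, if_pos ((hdict _).mpr hs)]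
        simp only [hset, hbt, hz, hTop]
        simp [List.append_assoc]
    · rw [topALoop, dif_neg hin, topT, dif_neg hin]
      exact ⟨z, by simp⟩

theorem findA_eq (nums : List Int) : findSubsequences_hs nums = topT nums 0 [] := by
  obtain ⟨z', hz⟩ := topA_spec nums nums.length 0 PySem.Dict.empty [] [] 0 (by omega)
    (by intro x; simp [PySem.Dict.empty, PySem.Dict.get?])
  unfold findSubsequences_hs
  rw [hz]
  simp

theorem portBAux (nums : List Int) : ∀ m : Nat,
    (∀ t raw path, (nums.length - t) * 2 ≤ m →
      dfsB nums t raw path = (raw ++ (Ff nums t).map (path ++ ·), path)) ∧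
    (∀ t i raw path, (nums.length - i) * 2 + 1 ≤ m →
      dfsBLoop nums t i raw path = (raw ++ (FfL nums t i).map (path ++ ·), path)) := by
  intro m
  induction m with
  | zero =>
    constructor
    · intro t raw path hm
      rw [dfsB, dif_neg (by omega), Ff, dif_neg (by omega)]
      simp
    · omega
  | succ m ih =>
    constructor
    · intro t raw path hm
      by_cases ht : t < nums.length
      · rw [dfsB, dif_pos ht, Ff, dif_pos ht]
        exact ih.2 t (t+1) raw path (by omega)
      · rw [dfsB, dif_neg ht, Ff, dif_neg ht]
        simp
    · intro t i raw path hm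
      by_cases hin : i < nums.length
      · by_cases hc : nums.getD t 0 ≤ nums.getD i 0
        · have hbt := ih.1 i (raw ++ [path ++ [nums.getD i 0]]) (path ++ [nums.getD i 0]) (by omega)
          have hrest := ih.2 t (i+1)
            (raw ++ [path ++ [nums.getD i 0]] ++ (Ff nums i).map ((path ++ [nums.getD i 0]) ++ ·))
            path (by omega)
          have hFfL : FfL nums t i =
              ([nums.getD i 0] :: (Ff nums i).map (nums.getD i 0 :: ·)) ++ FfL nums t (i+1) := by
            rw [FfL, dif_pos hin, if_pos hc]
          rw [dfsBLoop, dif_pos hin, if_pos hc]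
          simp only [hbt, List.dropLast_concat, hrest, hFfL]
          simp [List.map_map, Function.comp_def, List.append_assoc]
        · have hFfL : FfL nums t i = FfL nums t (i+1) := by
            rw [FfL, dif_pos hin, if_neg hc]
          rw [dfsBLoop, dif_pos hin, if_neg hc, ih.2 t (i+1) raw path (by omega), hFfL]
      · rw [dfsBLoop, dif_neg hin, FfL, dif_neg hin]
        simp

theorem topB_spec (nums : List Int) : ∀ (m i : Nat) raw (path : List Int),
    nums.length - i ≤ m →
    topBLoop nums i raw path = (raw ++ (topF nums i).map (path ++ ·), path) := by
  intro m
  induction m with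
  | zero =>
    intro i raw path hm
    rw [topBLoop, dif_neg (by omega), topF, dif_neg (by omega)]
    simp
  | succ m ih =>
    intro i raw path hm
    by_cases hin : i < nums.length
    · have hbt := (portBAux nums (2 * nums.length)).1 i raw (path ++ [nums.getD i 0]) (by omega)
      have hrest := ih (i+1) (raw ++ (Ff nums i).map ((path ++ [nums.getD i 0]) ++ ·)) path (by omega)
      have hTopF : topF nums i = (Ff nums i).map (nums.getD i 0 :: ·) ++ topF nums (i+1) := by
        rw [topF, dif_pos hin]
      rw [topBLoop, dif_pos hin]
      simp only [hbt, List.dropLast_concat, hrest, hTopF]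
      simp [List.map_map, Function.comp_def, List.append_assoc]
    · rw [topBLoop, dif_neg hin, topF, dif_neg hin]
      simp

theorem dedupB_spec : ∀ (raw : List (List Int)) (sSet : PySem.Set (List Int))
    (sL res : List (List Int)), (∀ l, l ∈ sSet ↔ l ∈ sL) →
    dedupBLoop sSet res raw = res ++ dedupS sL raw := by
  intro raw
  induction raw with
  | nil => intro sSet sL res h; simp [dedupBLoop, dedupS]
  | cons seq rest ih =>
    intro sSet sL res h
    by_cases hmem : seq ∈ sL
    · rw [dedupBLoop, if_pos (by rw [PySem.Set.contains_iff]; exact (h seq).mpr hmem),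
        ih sSet sL res h]
      simp [dedupS, hmem]
    · rw [dedupBLoop, if_neg (by rw [PySem.Set.contains_iff, h]; exact hmem),
        ih (PySem.Set.add sSet seq) (seq :: sL) (res ++ [seq])
          (by intro l; rw [PySem.Set.mem_add, h]; simp; tauto)]
      simp [dedupS, hmem]

theorem findB_eq (nums : List Int) : findSubsequences_hs_alt nums = dedupS [] (topF nums 0) := by
  unfold findSubsequences_hs_alt
  rw [topB_spec nums nums.length 0 [] [] (by omega)]
  simp only [List.nil_append, List.map_id']
  rw [dedupB_spec (topF nums 0) PySem.Set.empty [] [] (by intro l; simp [PySem.Set.empty])]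
  simp

-- ===== VERDICT (by name: the statement is the Claim_ definition above) =====
theorem findSubsequences_hs_spec : Claim_equal_findSubsequences_hs := by
  intro nums _
  unfold Spec_findSubsequences_hs
  rw [findA_eq, findB_eq]
  exact (mainTop nums nums.length 0 [] [] (by omega)
    (by simp) (by omega) (by simp)).symm
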